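-- pv_equiv track=rewrite | github.com/jgarthur/proteus | legacy/python/src/proteus/engine_reference.py | _scan_forward_opcode_python
-- ===== SOURCE A (Python) =====
-- def _scan_forward_opcode_python(instructions: list[int], start_ip: int, target_opcode: int) -> int:
--     size = len(instructions)
--     index = (start_ip + 1) % size
--     for _ in range(size):
--         if (int(instructions[index]) & 0xFF) == target_opcode:
--             return index
--         index = (index + 1) % size
--     return -1
-- ===== SOURCE B (Python) =====
-- def _scan_forward_opcode_python(instructions: list[int], start_ip: int, target_opcode: int) -> int:
--     size = len(instructions)
--     start = (start_ip + 1) % size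
--     matches = [i for i, ins in enumerate(instructions) if (int(ins) & 0xFF) == target_opcode]
--     if not matches:
--         return -1
--     return min(matches, key=lambda i: (i - start) % size)
-- ===== Notes on version B (the rewrite author's own statement) =====
-- stated objective: alternative
-- what changed: Replaces the circular scan with early return by a filter-then-select algorithm: one enumerate pass collects every matching index, then min with key (i - start) % size picks the match at minimal circular distance from the start position.
import Mathlib
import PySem

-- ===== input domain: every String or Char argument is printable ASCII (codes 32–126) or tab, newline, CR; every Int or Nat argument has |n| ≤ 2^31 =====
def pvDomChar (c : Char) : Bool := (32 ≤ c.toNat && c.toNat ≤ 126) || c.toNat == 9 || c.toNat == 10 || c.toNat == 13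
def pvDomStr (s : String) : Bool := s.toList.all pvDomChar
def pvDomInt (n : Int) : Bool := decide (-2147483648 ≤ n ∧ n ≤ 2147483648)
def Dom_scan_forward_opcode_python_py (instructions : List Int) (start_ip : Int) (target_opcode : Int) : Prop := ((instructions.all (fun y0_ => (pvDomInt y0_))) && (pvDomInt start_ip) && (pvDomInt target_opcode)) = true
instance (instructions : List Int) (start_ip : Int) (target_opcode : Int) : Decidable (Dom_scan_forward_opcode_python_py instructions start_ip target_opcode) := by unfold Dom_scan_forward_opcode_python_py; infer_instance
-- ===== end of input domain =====

-- B replaces the circular scan with early return by filter-then-select: one enumerate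
-- pass collects all matching indices, then min by key (i - start) % size picks the one
-- at minimal circular distance from the start position (an alternative algorithm).

-- ===== PORT A =====
-- A's 'for _ in range(size)' loop carrying the running index.
def pvScanALoop (instructions : List Int) (target_opcode : Int) (size : Int) : Nat → Int → Int
  | 0, _ => -1
  | Nat.succ n, index =>
    match PySem.List.pyGet? instructions index with
    | none => -1
    | some v =>
      if PySem.Int.band v 255 = target_opcode then index
      else pvScanALoop instructions target_opcode size n (PySem.Int.mod (index + 1) size)

def scan_forward_opcode_python_py (instructions : List Int) (start_ip : Int) (target_opcode : Int) : Int :=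
  -- size = len(instructions); index starts at (start_ip + 1) % size (inlined locals)
  pvScanALoop instructions target_opcode (instructions.length : Int) instructions.length
    (PySem.Int.mod (start_ip + 1) (instructions.length : Int))

-- ===== PORT B =====
def scan_forward_opcode_python_py_alt (instructions : List Int) (start_ip : Int) (target_opcode : Int) : Int :=
  -- size = len(instructions); start = (start_ip + 1) % size
  -- hits = [i for i, ins in enumerate(instructions) if (int(ins) & 0xFF) == target_opcode]
  -- if not hits: return -1; return min(hits, key=lambda i: (i - start) % size)
  let size : Int := (instructions.length : Int)
  let start : Int := PySem.Int.mod (start_ip + 1) size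
  let hits : List Int :=
    ((PySem.List.enumerate instructions).filter
      (fun p => PySem.Int.band p.2 255 == target_opcode)).map Prod.fst
  match PySem.List.min? hits (fun i => PySem.Int.mod (i - start) size) with
  | some i => i
  | none => -1

-- ===== PRECONDITION & SPEC =====
-- Pre_ excludes only the empty list, on which A raises ZeroDivisionError ((start_ip+1) % 0).
def Pre_scan_forward_opcode_python_py (instructions : List Int) (start_ip : Int) (target_opcode : Int) : Prop := instructions ≠ []
instance (instructions : List Int) (start_ip : Int) (target_opcode : Int) : Decidable (Pre_scan_forward_opcode_python_py instructions start_ip target_opcode) := by unfold Pre_scan_forward_opcode_python_py; infer_instance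
def pvWitness_scan_forward_opcode_python_py : List Int × Int × Int := ([1, 2], 0, 2)

def Spec_scan_forward_opcode_python_py (instructions : List Int) (start_ip : Int) (target_opcode : Int) (out : Int) : Prop := out = scan_forward_opcode_python_py_alt instructions start_ip target_opcode
instance (instructions : List Int) (start_ip : Int) (target_opcode : Int) (out : Int) : Decidable (Spec_scan_forward_opcode_python_py instructions start_ip target_opcode out) := by unfold Spec_scan_forward_opcode_python_py; infer_instance

-- ===== CLAIM (what is proved, stated in full; the proofs are below) =====
def Claim_equal_scan_forward_opcode_python_py : Prop := ∀ (instructions : List Int) (start_ip : Int) (target_opcode : Int), Dom_scan_forward_opcode_python_py instructions start_ip target_opcode → Pre_scan_forward_opcode_python_py instructions start_ip target_opcode → Spec_scan_forward_opcode_python_py instructions start_ip target_opcode (scan_forward_opcode_python_py instructions start_ip target_opcode)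

-- ===== LEMMAS AND PROOFS =====

-- the match predicate on an index (only applied to in-range indices in the proofs)
def pvPred (instructions : List Int) (t : Int) (i : Int) : Bool :=
  PySem.Int.band (instructions.getD i.toNat 0) 255 == t

-- the index sequence A's loop visits: n steps starting at idx, wrapping mod size
def pvCirc (size : Int) : Nat → Int → List Int
  | 0, _ => []
  | Nat.succ n, idx => idx :: pvCirc size n (PySem.Int.mod (idx + 1) size)

-- for 0 ≤ idx, idx + n ≤ size: no wrap happens, the visited indices are a plain range
theorem pvCirc_lin (size : Int) (n : Nat) : ∀ idx : Int, 0 ≤ idx → idx + n ≤ size →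
    pvCirc size n idx = PySem.List.pyRange idx (idx + n) 1 := by
  induction n with
  | zero => intro idx _ _; simp [pvCirc, PySem.List.pyRange_one_eq_nil]
  | succ n ih =>
    intro idx h0 hle
    have hlt : idx < idx + (n + 1 : Nat) := by push_cast; omega
    rw [pvCirc, PySem.List.pyRange_one_cons hlt]
    by_cases hw : idx + 1 < size
    · have hm : PySem.Int.mod (idx + 1) size = idx + 1 := by
        rw [PySem.Int.mod_eq_emod_of_pos (by omega)]
        exact Int.emod_eq_of_lt (by omega) hw
      rw [hm, ih (idx + 1) (by omega) (by push_cast at hle ⊢; omega)]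
      congr 1
      push_cast; ring
    · have hn : n = 0 := by push_cast at hle; omega
      subst hn
      simp [pvCirc, PySem.List.pyRange_one_eq_nil]

-- splitting at the wrap: idx + a + 1 = size
theorem pvCirc_wrap (size : Int) (a : Nat) : ∀ (b : Nat) (idx : Int), 0 ≤ idx → idx + a + 1 = size →
    pvCirc size (a + 1 + b) idx = PySem.List.pyRange idx size 1 ++ pvCirc size b 0 := by
  induction a with
  | zero =>
    intro b idx h0 hsz
    have hm : PySem.Int.mod (idx + 1) size = 0 := by
      rw [PySem.Int.mod_eq_emod_of_pos (by omega)]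
      simp [show idx + 1 = size by push_cast at hsz; omega]
    rw [show (0 + 1 + b) = Nat.succ b from by omega, pvCirc, hm]
    rw [show size = idx + 1 from by push_cast at hsz; omega, PySem.List.pyRange_one_singleton]
    simp
  | succ a ih =>
    intro b idx h0 hsz
    have hw : idx + 1 < size := by push_cast at hsz; omega
    have hm : PySem.Int.mod (idx + 1) size = idx + 1 := by
      rw [PySem.Int.mod_eq_emod_of_pos (by omega)]
      exact Int.emod_eq_of_lt (by omega) hw
    rw [show (a + 1 + 1 + b) = Nat.succ (a + 1 + b) from by omega, pvCirc, hm]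
    rw [ih b (idx + 1) (by omega) (by push_cast at hsz ⊢; omega)]
    conv_rhs => rw [PySem.List.pyRange_one_cons (show idx < size from by push_cast at hsz; omega)]
    simp

-- the full circular order is the two contiguous ranges
theorem pvCirc_split (instructions : List Int) (start : Int)
    (h0 : 0 ≤ start) (hlt : start < (instructions.length : Int)) :
    pvCirc (instructions.length : Int) instructions.length start =
      PySem.List.pyRange start (instructions.length : Int) 1 ++ PySem.List.pyRange 0 start 1 := by
  set size : Int := (instructions.length : Int) with hsz
  have ha : ∃ a : Nat, start + a + 1 = size ∧ a + 1 + start.toNat = instructions.length := by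
    refine ⟨(size - start - 1).toNat, by omega, by omega⟩
  obtain ⟨a, ha1, ha2⟩ := ha
  rw [← ha2, pvCirc_wrap size a start.toNat start h0 ha1]
  congr 1
  rw [pvCirc_lin size start.toNat 0 le_rfl (by omega)]
  congr 1
  omega

-- A's loop equals find-first of pvPred over the visited index list
theorem pvScanALoop_eq_find (instructions : List Int) (t : Int) (n : Nat) :
    ∀ idx : Int, 0 ≤ idx → idx < (instructions.length : Int) →
    pvScanALoop instructions t (instructions.length : Int) n idx =
      (match List.find? (pvPred instructions t) (pvCirc (instructions.length : Int) n idx) with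
       | some i => i
       | none => -1) := by
  induction n with
  | zero => intro idx _ _; simp [pvScanALoop, pvCirc]
  | succ n ih =>
    intro idx h0 hlt
    have hn : idx.toNat < instructions.length := by omega
    have hget : PySem.List.pyGet? instructions idx = some instructions[idx.toNat] :=
      PySem.List.pyGet?_eq_some_getElem _ h0 hlt
    have hgd : instructions.getD idx.toNat 0 = instructions[idx.toNat] :=
      List.getD_eq_getElem _ _ hn
    rw [pvScanALoop, pvCirc, hget, List.find?_cons]
    by_cases hb : PySem.Int.band instructions[idx.toNat] 255 = t
    · simp [pvPred, List.getD, List.getElem?_eq_getElem hn, hb]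
    · have hp : pvPred instructions t idx = false := by
        simp [pvPred, List.getD, List.getElem?_eq_getElem hn, hb]
      simp only [if_neg hb, hp]
      have hpos : (0 : Int) < (instructions.length : Int) := by omega
      exact ih _ (PySem.Int.mod_nonneg _ hpos) (PySem.Int.mod_lt _ hpos)

-- membership in B's hits list
theorem pvMem_hits (instructions : List Int) (t : Int) (i : Int) :
    i ∈ ((PySem.List.enumerate instructions).filter
          (fun p => PySem.Int.band p.2 255 == t)).map Prod.fst ↔
      0 ≤ i ∧ i < (instructions.length : Int) ∧ pvPred instructions t i = true := by
  constructor
  · rintro hm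
    obtain ⟨⟨j, v⟩, hf, rfl⟩ := List.mem_map.mp hm
    obtain ⟨he, hq⟩ := List.mem_filter.mp hf
    obtain ⟨k, hk, hpair⟩ := (PySem.List.mem_enumerate_iff _ _ _).mp he
    obtain ⟨rfl, rfl⟩ := Prod.mk.injEq .. ▸ hpair
    simp only [beq_iff_eq] at hq
    refine ⟨by omega, by push_cast; omega, ?_⟩
    have : ((0 : Int) + k).toNat = k := by omega
    simp [pvPred, List.getD, List.getElem?_eq_getElem hk, hq]
  · rintro ⟨h0, hlt, hp⟩
    have hk : i.toNat < instructions.length := by omega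
    refine List.mem_map.mpr ⟨(i, instructions[i.toNat]), List.mem_filter.mpr ⟨?_, ?_⟩, rfl⟩
    · exact (PySem.List.mem_enumerate_iff _ _ _).mpr ⟨i.toNat, hk, by simp; omega⟩
    · simp only [beq_iff_eq]
      simpa [pvPred, List.getD, List.getElem?_eq_getElem hk] using hp
  
-- find? over a list with strictly increasing keys: the result is the unique key-minimum among hits
theorem pvFind_min (k : Int → Int) (p : Int → Bool) :
    ∀ (l : List Int), l.Pairwise (fun a b => k a < k b) → ∀ m, List.find? p l = some m →
      ∀ y ∈ l, p y = true → y = m ∨ k m < k y := by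
  intro l hpw
  induction l with
  | nil => intro m hm; simp at hm
  | cons x rest ih =>
    intro m hm y hy hpy
    rw [List.find?_cons] at hm
    rcases List.pairwise_cons.mp hpw with ⟨hx, hrest⟩
    by_cases hpx : p x = true
    · simp [hpx] at hm
      subst hm
      rcases List.mem_cons.mp hy with rfl | hy'
      · exact Or.inl rfl
      · exact Or.inr (hx y hy')
    · simp [hpx] at hm
      rcases List.mem_cons.mp hy with rfl | hy'
      · simp [hpy] at hpx
      · exact ih hrest m hm y hy' hpy

-- the key is strictly increasing along the split circular order
theorem pvKey_pairwise (size start : Int) (h0 : 0 ≤ start) (hlt : start < size) :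
    (PySem.List.pyRange start size 1 ++ PySem.List.pyRange 0 start 1).Pairwise
      (fun a b => PySem.Int.mod (a - start) size < PySem.Int.mod (b - start) size) := by
  have hk1 : ∀ i, start ≤ i → i < size → PySem.Int.mod (i - start) size = i - start := by
    intro i h1 h2
    rw [PySem.Int.mod_eq_emod_of_pos (by omega)]
    exact Int.emod_eq_of_lt (by omega) (by omega)
  have hk2 : ∀ i, 0 ≤ i → i < start → PySem.Int.mod (i - start) size = i - start + size := by
    intro i h1 h2
    rw [PySem.Int.mod_eq_emod_of_pos (by omega)]
    have := Int.add_mul_emod_self_left (a := i - start) (b := size) (c := 1)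
    rw [show i - start + size * 1 = i - start + size from by ring] at this
    rw [← this]
    exact Int.emod_eq_of_lt (by omega) (by omega)
  rw [List.pairwise_append]
  refine ⟨?_, ?_, ?_⟩
  · refine (PySem.List.pairwise_lt_pyRange_one start size).imp_of_mem ?_
    intro a b ha hb hab
    rcases (PySem.List.mem_pyRange_one).mp ha with ⟨ha1, ha2⟩
    rcases (PySem.List.mem_pyRange_one).mp hb with ⟨hb1, hb2⟩
    rw [hk1 a ha1 ha2, hk1 b hb1 hb2]; omega
  · refine (PySem.List.pairwise_lt_pyRange_one 0 start).imp_of_mem ?_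
    intro a b ha hb hab
    rcases (PySem.List.mem_pyRange_one).mp ha with ⟨ha1, ha2⟩
    rcases (PySem.List.mem_pyRange_one).mp hb with ⟨hb1, hb2⟩
    rw [hk2 a ha1 ha2, hk2 b hb1 hb2]; omega
  · intro a ha b hb
    rcases (PySem.List.mem_pyRange_one).mp ha with ⟨ha1, ha2⟩
    rcases (PySem.List.mem_pyRange_one).mp hb with ⟨hb1, hb2⟩
    rw [hk1 a ha1 ha2, hk2 b hb1 hb2]; omega

-- ===== VERDICT (by name: the statement is the Claim_ definition above) =====
theorem scan_forward_opcode_python_py_spec : Claim_equal_scan_forward_opcode_python_py := by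
  intro instructions start_ip target_opcode _ hpre
  unfold Spec_scan_forward_opcode_python_py
  unfold scan_forward_opcode_python_py scan_forward_opcode_python_py_alt
  have hpos : (0 : Int) < (instructions.length : Int) := by
    have : instructions.length ≠ 0 := fun h => hpre (List.eq_nil_of_length_eq_zero h)
    omega
  set size : Int := (instructions.length : Int) with hsize
  set start := PySem.Int.mod (start_ip + 1) size with hstart
  have h0 : 0 ≤ start := PySem.Int.mod_nonneg _ hpos
  have hlt : start < size := PySem.Int.mod_lt _ hpos
  set k : Int → Int := fun i => PySem.Int.mod (i - start) size with hk
  set hits : List Int :=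
    ((PySem.List.enumerate instructions).filter
      (fun p => PySem.Int.band p.2 255 == target_opcode)).map Prod.fst with hhits
  set L := PySem.List.pyRange start size 1 ++ PySem.List.pyRange 0 start 1 with hL
  have hmemL : ∀ i, i ∈ L ↔ 0 ≤ i ∧ i < size := by
    intro i
    simp only [hL, List.mem_append, PySem.List.mem_pyRange_one]
    omega
  have hmemM : ∀ i, i ∈ hits ↔ 0 ≤ i ∧ i < size ∧ pvPred instructions target_opcode i = true :=
    fun i => pvMem_hits instructions target_opcode i
  rw [pvScanALoop_eq_find instructions target_opcode instructions.length start h0 hlt]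
  rw [pvCirc_split instructions start h0 hlt, ← hL]
  have hpw := pvKey_pairwise size start h0 hlt
  rw [← hL] at hpw
  cases hfind : List.find? (pvPred instructions target_opcode) L with
  | none =>
    have hno := List.find?_eq_none.mp hfind
    have hM : hits = [] := by
      rw [List.eq_nil_iff_forall_not_mem]
      intro i hi
      rcases (hmemM i).mp hi with ⟨h1, h2, h3⟩
      exact absurd h3 (by simpa using hno i ((hmemL i).mpr ⟨h1, h2⟩))
    rw [hM]
    simp [PySem.List.min?]
  | some m =>
    have hmL : m ∈ L := List.mem_of_find?_eq_some hfind
    have hpm : pvPred instructions target_opcode m = true := List.find?_some hfind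
    rcases (hmemL m).mp hmL with ⟨hm0, hmlt⟩
    have hmM : m ∈ hits := (hmemM m).mpr ⟨hm0, hmlt, hpm⟩
    have hmin : PySem.List.min? hits k = some m := by
      cases hmm : PySem.List.min? hits k with
      | none =>
        exact absurd ((PySem.List.min?_eq_none_iff _ _).mp hmm ▸ hmM) (List.not_mem_nil)
      | some m' =>
        have hm'M := PySem.List.min?_mem hmm
        have hle : k m' ≤ k m := PySem.List.min?_isMin hmm m hmM
        rcases (hmemM m').mp hm'M with ⟨h1, h2, h3⟩
        have hm'L : m' ∈ L := (hmemL m').mpr ⟨h1, h2⟩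
        rcases pvFind_min k (pvPred instructions target_opcode) L hpw m hfind m' hm'L h3 with rfl | hgt
        · rfl
        · omega
    simp only [hk] at hmin
    show _ = (match PySem.List.min? hits (fun i => PySem.Int.mod (i - start) size) with
      | some i => i
      | none => (-1 : Int))
    rw [hmin]
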